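-- pv_equiv track=rewrite | github.com/flo12392/project-euler | euler301.py | nimsum
-- ===== SOURCE A (Python) =====
-- def nimsum(n):
--     n = [bin(x)[2:] for x in n]
--     maxlength = max(len(x) for x in n)
--     n = [x.rjust(maxlength, '0') for x in n]
--     results = [(int(n[0][x]) + int(n[1][x]) + int(n[2][x])) % 2 != 0 for x in range(maxlength)]
--     if(sum(results) == 0):
--         return 0
--     else:
--         return 1
-- ===== SOURCE B (Python) =====
-- def nimsum(n):
--     s = n[0] ^ n[1] ^ n[2]
--     return 0 if s == 0 else 1
-- ===== Notes on version B (the rewrite author's own statement) =====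
-- stated objective: simpler
-- what changed: B computes the nim-sum directly as the integer XOR of the first three elements instead of building padded binary strings and testing per-bit digit-sum parity.
import Mathlib
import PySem

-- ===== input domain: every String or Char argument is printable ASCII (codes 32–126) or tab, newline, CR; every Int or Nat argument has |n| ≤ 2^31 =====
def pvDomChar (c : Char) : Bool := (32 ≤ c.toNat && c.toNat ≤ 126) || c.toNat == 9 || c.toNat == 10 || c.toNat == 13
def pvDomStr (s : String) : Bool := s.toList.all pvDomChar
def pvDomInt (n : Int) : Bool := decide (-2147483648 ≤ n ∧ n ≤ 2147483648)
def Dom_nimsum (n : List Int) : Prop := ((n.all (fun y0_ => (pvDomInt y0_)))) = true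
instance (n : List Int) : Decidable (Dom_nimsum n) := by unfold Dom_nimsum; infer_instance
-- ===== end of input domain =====

-- B replaces A's padded binary strings and per-bit digit-sum parity test by a single
-- integer XOR of the first three elements (simpler; return value only).

-- ===== PORT A =====
-- bin(k) for k > 0, without the '0b' prefix (big-endian digit list)
def pvBinNat (k : Nat) : List Char :=
  if k = 0 then []
  else pvBinNat (k / 2) ++ [if k % 2 = 1 then '1' else '0']
decreasing_by exact Nat.div_lt_self (Nat.pos_of_ne_zero (by assumption)) (by norm_num)

-- bin(x)[2:]  (for x < 0 Python leaves the 'b' of '-0b…')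
def pvPyBin (x : Int) : List Char :=
  if x < 0 then 'b' :: pvBinNat x.natAbs
  else if x = 0 then ['0']
  else pvBinNat x.natAbs

-- int(str(c)); exact for the digit characters A indexes under Pre_
def pvCharInt (c : Char) : Int := (c.toNat : Int) - 48

def nimsum (n : List Int) : Int :=
  let strs := n.map pvPyBin
  let maxlength := (strs.map List.length).foldl max 0
  let padded := strs.map (fun s => List.replicate (maxlength - s.length) '0' ++ s)
  let results := (List.range maxlength).map (fun x =>
    decide ((pvCharInt ((padded.getD 0 []).getD x '0') +
             pvCharInt ((padded.getD 1 []).getD x '0') +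
             pvCharInt ((padded.getD 2 []).getD x '0')) % 2 ≠ 0))
  if results.countP id = 0 then 0 else 1

-- ===== PORT B =====
def nimsum_alt (n : List Int) : Int :=
  let s := Int.xor (Int.xor (n.getD 0 0) (n.getD 1 0)) (n.getD 2 0)
  if s = 0 then 0 else 1

-- ===== PRECONDITION & SPEC =====
-- exactly where A returns: at least three elements, the first three non-negative
-- (a negative among the first three makes int('b') raise ValueError; fewer than
-- three elements raise IndexError / max() on empty raises ValueError)
def Pre_nimsum (n : List Int) : Prop :=
  3 ≤ n.length ∧ 0 ≤ n.getD 0 0 ∧ 0 ≤ n.getD 1 0 ∧ 0 ≤ n.getD 2 0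
instance (n : List Int) : Decidable (Pre_nimsum n) := by unfold Pre_nimsum; infer_instance

def pvWitness_nimsum : List Int := [5, 3, 6]

def Spec_nimsum (n : List Int) (out : Int) : Prop := out = nimsum_alt n
instance (n : List Int) (out : Int) : Decidable (Spec_nimsum n out) := by unfold Spec_nimsum; infer_instance

-- ===== CLAIM (what is proved, stated in full; the proofs are below) =====
def Claim_equal_nimsum : Prop := ∀ (n : List Int), Dom_nimsum n → Pre_nimsum n → Spec_nimsum n (nimsum n)

-- ===== LEMMAS AND PROOFS =====

-- little-endian bits of k (empty for 0)
def pvLeBits (k : Nat) : List Char :=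
  if k = 0 then []
  else (if k % 2 = 1 then '1' else '0') :: pvLeBits (k / 2)
decreasing_by exact Nat.div_lt_self (Nat.pos_of_ne_zero (by assumption)) (by norm_num)

lemma pvBinNat_eq_rev (k : Nat) : pvBinNat k = (pvLeBits k).reverse := by
  induction k using pvBinNat.induct with
  | case1 => simp [pvBinNat, pvLeBits]
  | case2 k hk ih =>
    rw [pvBinNat, pvLeBits, if_neg hk, if_neg hk, ih, List.reverse_cons]

-- bits beyond the list are 0
lemma pvLeBits_getD (i k : Nat) :
    (pvLeBits k).getD i '0' = if Nat.testBit k i then '1' else '0' := by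
  induction i generalizing k with
  | zero =>
    rw [pvLeBits]
    by_cases hk : k = 0
    · simp [hk]
    · simp [hk, Nat.testBit_zero]
  | succ i ih =>
    rw [pvLeBits]
    by_cases hk : k = 0
    · simp [hk]
    · simp only [hk, if_false, List.getD_cons_succ]
      rw [ih, Nat.testBit_succ]

lemma pvLeBits_testBit_ge (k j : Nat) (h : (pvLeBits k).length ≤ j) :
    Nat.testBit k j = false := by
  induction j generalizing k with
  | zero =>
    rw [pvLeBits] at h
    by_cases hk : k = 0
    · simp [hk]
    · simp [hk] at h
  | succ j ih =>
    by_cases hk : k = 0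
    · simp [hk]
    · rw [pvLeBits, if_neg hk] at h
      rw [Nat.testBit_succ]
      exact ih (k / 2) (by simpa using h)

-- the string A builds for a non-negative x, as reversed little-endian bits
def pvLeBits' (k : Nat) : List Char := if k = 0 then ['0'] else pvLeBits k

lemma pvPyBin_nonneg (x : Int) (hx : 0 ≤ x) : pvPyBin x = (pvLeBits' x.natAbs).reverse := by
  rw [pvPyBin, pvLeBits', if_neg (not_lt.mpr hx)]
  by_cases h0 : x = 0
  · simp [h0]
  · have : x.natAbs ≠ 0 := by omega
    rw [if_neg h0, if_neg this, pvBinNat_eq_rev]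

lemma pvLeBits'_getD (i k : Nat) :
    (pvLeBits' k).getD i '0' = if Nat.testBit k i then '1' else '0' := by
  rw [pvLeBits']
  by_cases hk : k = 0
  · cases i <;> simp [hk]
  · rw [if_neg hk, pvLeBits_getD]

lemma pvLeBits'_testBit_ge (k j : Nat) (h : (pvLeBits' k).length ≤ j) :
    Nat.testBit k j = false := by
  rw [pvLeBits'] at h
  by_cases hk : k = 0
  · simp [hk]
  · rw [if_neg hk] at h
    exact pvLeBits_testBit_ge k j h

-- indexing the left-padded reversed bit list reads bit (w - 1 - x)
lemma pvPadded_getD (l : List Char) (w x : Nat) (hl : l.length ≤ w) (hx : x < w) :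
    (List.replicate (w - l.length) '0' ++ l.reverse).getD x '0' = l.getD (w - 1 - x) '0' := by
  by_cases hx2 : x < w - l.length
  · rw [List.getD_append _ _ _ x (by simpa using hx2)]
    have h1 : (List.replicate (w - l.length) '0').getD x '0' = '0' :=
      List.getD_replicate _ hx2
    have h2 : l.length ≤ w - 1 - x := by omega
    rw [h1, List.getD_eq_getElem?_getD, List.getElem?_eq_none (by omega), Option.getD_none]
  · have hlen : w - l.length ≤ x := by omega
    rw [List.getD_append_right _ _ _ x (by simpa using hlen)]
    simp only [List.length_replicate]
    have hi : x - (w - l.length) < l.reverse.length := by simp; omega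
    rw [List.getD_eq_getElem _ _ hi, List.getElem_reverse]
    rw [List.getD_eq_getElem _ _ (show w - 1 - x < l.length by omega)]
    congr 1
    omega

-- foldl max dominates every member
lemma pvLe_foldl_max (xs : List Nat) (i a : Nat) (h : a ∈ xs ∨ a ≤ i) :
    a ≤ xs.foldl max i := by
  induction xs generalizing i with
  | nil => simpa using h
  | cons y ys ih =>
    simp only [List.foldl_cons]
    apply ih
    rcases h with h | h
    · rcases List.mem_cons.mp h with h | h
      · right; omega
      · left; exact h
    · right; omega

-- parity of three {0,1} digits vs xor of three bits
lemma pvParity3 (p q r : Bool) :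
    ((if p then (1:Int) else 0) + (if q then 1 else 0) + (if r then 1 else 0)) % 2 ≠ 0 ↔
      (p ^^ q ^^ r) = true := by
  cases p <;> cases q <;> cases r <;> decide

lemma pvCast_xor (m k : Nat) : Int.xor (m : Int) (k : Int) = ((m ^^^ k : Nat) : Int) := by
  simp [Int.xor]

-- every element of the results list is false iff the per-index condition fails everywhere
lemma pvCountP_id_zero (l : List Bool) : l.countP id = 0 ↔ ∀ b ∈ l, b = false := by
  rw [List.countP_eq_zero]
  simp

theorem nimsum_eq (n : List Int) (hpre : Pre_nimsum n) : nimsum n = nimsum_alt n := by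
  obtain ⟨hlen, h0, h1, h2⟩ := hpre
  obtain ⟨a, b, c, rest, rfl⟩ : ∃ a b c rest, n = a :: b :: c :: rest := by
    match n, hlen with
    | a :: b :: c :: rest, _ => exact ⟨a, b, c, rest, rfl⟩
  simp only [List.getD_cons_zero, List.getD_cons_succ] at h0 h1 h2
  -- abbreviations
  set na := a.natAbs with hna
  set nb := b.natAbs with hnb
  set nc := c.natAbs with hnc
  unfold nimsum nimsum_alt
  simp only [List.map_cons, List.getD_cons_zero, List.getD_cons_succ]
  set w := ((pvPyBin a :: pvPyBin b :: pvPyBin c :: rest.map pvPyBin).map List.length).foldl max 0 with hw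
  have hwa : (pvLeBits' na).length ≤ w := by
    have he : (pvLeBits' na).length = (pvPyBin a).length := by
      rw [pvPyBin_nonneg a h0, List.length_reverse]
    rw [he, hw]
    exact pvLe_foldl_max _ 0 _ (Or.inl (by simp))
  have hwb : (pvLeBits' nb).length ≤ w := by
    have he : (pvLeBits' nb).length = (pvPyBin b).length := by
      rw [pvPyBin_nonneg b h1, List.length_reverse]
    rw [he, hw]
    exact pvLe_foldl_max _ 0 _ (Or.inl (by simp))
  have hwc : (pvLeBits' nc).length ≤ w := by
    have he : (pvLeBits' nc).length = (pvPyBin c).length := by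
      rw [pvPyBin_nonneg c h2, List.length_reverse]
    rw [he, hw]
    exact pvLe_foldl_max _ 0 _ (Or.inl (by simp))
  -- the per-position digit read by A is the corresponding test bit
  have hdig : ∀ (k : Nat) (x : Nat), x < w → (pvLeBits' k).length ≤ w →
      pvCharInt ((List.replicate (w - ((pvLeBits' k).reverse).length) '0' ++ (pvLeBits' k).reverse).getD x '0')
        = (if Nat.testBit k (w - 1 - x) then (1:Int) else 0) := by
    intro k x hx hk
    rw [List.length_reverse, pvPadded_getD _ _ _ hk hx, pvLeBits'_getD]
    by_cases hb : Nat.testBit k (w - 1 - x) <;> simp [hb, pvCharInt]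
  -- condition equivalence
  have key : ((List.range w).map (fun x =>
      decide ((pvCharInt ((List.replicate (w - (pvPyBin a).length) '0' ++ pvPyBin a).getD x '0') +
               pvCharInt ((List.replicate (w - (pvPyBin b).length) '0' ++ pvPyBin b).getD x '0') +
               pvCharInt ((List.replicate (w - (pvPyBin c).length) '0' ++ pvPyBin c).getD x '0')) % 2 ≠ 0))).countP id = 0
      ↔ (na ^^^ nb ^^^ nc) = 0 := by
    rw [pvCountP_id_zero]
    constructor
    · intro h
      apply Nat.eq_of_testBit_eq
      intro j
      rw [Nat.zero_testBit, Nat.testBit_xor, Nat.testBit_xor]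
      by_cases hj : j < w
      · have hx : w - 1 - j < w := by omega
        have := h _ (List.mem_map.mpr ⟨w - 1 - j, List.mem_range.mpr hx, rfl⟩)
        rw [decide_eq_false_iff_not] at this
        rw [pvPyBin_nonneg a h0, pvPyBin_nonneg b h1, pvPyBin_nonneg c h2] at this
        rw [hdig na _ hx hwa, hdig nb _ hx hwb, hdig nc _ hx hwc] at this
        have hjj : w - 1 - (w - 1 - j) = j := by omega
        rw [hjj] at this
        rw [not_iff_not.mpr (pvParity3 _ _ _)] at this
        simpa using this
      · rw [pvLeBits'_testBit_ge na j (by omega), pvLeBits'_testBit_ge nb j (by omega),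
            pvLeBits'_testBit_ge nc j (by omega)]
        rfl
    · intro h r hr
      obtain ⟨x, hx, rfl⟩ := List.mem_map.mp hr
      rw [decide_eq_false_iff_not]
      rw [pvPyBin_nonneg a h0, pvPyBin_nonneg b h1, pvPyBin_nonneg c h2]
      rw [List.mem_range] at hx
      rw [hdig na _ hx hwa, hdig nb _ hx hwb, hdig nc _ hx hwc]
      rw [not_iff_not.mpr (pvParity3 _ _ _)]
      have := congrArg (fun m => Nat.testBit m (w - 1 - x)) h
      simp only [Nat.testBit_xor, Nat.zero_testBit] at this
      simpa using this
  -- B's xor in terms of the Nat xor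
  have hx3 : Int.xor (Int.xor a b) c = (((na ^^^ nb) ^^^ nc : Nat) : Int) := by
    rw [show a = (na : Int) from by omega, show b = (nb : Int) from by omega,
        show c = (nc : Int) from by omega, pvCast_xor, pvCast_xor]
  rw [hx3]
  split_ifs with hA hB hB
  · rfl
  · exact absurd (by exact_mod_cast key.mp hA) hB
  · exact absurd (key.mpr (by exact_mod_cast hB)) hA
  · rfl

-- ===== VERDICT (by name: the statement is the Claim_ definition above) =====
theorem nimsum_spec : Claim_equal_nimsum := by
  intro n _ hpre
  exact nimsum_eq n hpre
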